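-- pv_equiv track=rewrite | github.com/jiyoungzero/2023-Codingtest-Study | jiyoung풀이/PGS문제/pgs_외톨이알파벳.py | solution
-- ===== SOURCE A (Python) =====
-- from collections import Counter
--
-- def solution(input_string):
--     answer = ''
--     flag_cnt = False
--     flag_frq = False
--     result = []
--     # 알파벳 개수 2개 이상인지
--     cnt_lst = Counter(input_string)
--     cnt_dict = dict(cnt_lst)
--     for k, v in cnt_dict.items():
--         if v >= 2:
--             result.append(k)
--
--     # 뭉탱이로 빈도 수 2번 이상인지
--     not_repeat_string = ''
--     prev = ''
--
--     for ele in input_string: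
--         if prev == '' or prev != ele:
--             not_repeat_string += ele
--         prev = ele
--
--     not_repeat = dict(Counter(not_repeat_string))
--     for t in result:
--         if not_repeat[t] >= 2:
--             answer+=t
--
--
--     return "".join(sorted(answer)) if len(answer) > 0 else "N"
-- ===== SOURCE B (Python) =====
-- def solution(input_string):
--     # one pass: count, per letter, the number of maximal consecutive runs
--     runs = {}
--     prev = None
--     for ch in input_string:
--         if ch != prev:
--             runs[ch] = runs.get(ch, 0) + 1
--         prev = ch
--     loners = sorted(ch for ch, n in runs.items() if n >= 2)
--     return ''.join(loners) if loners else 'N'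
-- ===== Notes on version B (the rewrite author's own statement) =====
-- stated objective: simpler
-- what changed: Single pass maintaining a letter->run-count dict (prev + increment on run start) instead of building two Counters (total counts and the counts of a consecutive-dedup string built by string concatenation) and intersecting them; the total-count>=2 filter is dropped as redundant.
import Mathlib
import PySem

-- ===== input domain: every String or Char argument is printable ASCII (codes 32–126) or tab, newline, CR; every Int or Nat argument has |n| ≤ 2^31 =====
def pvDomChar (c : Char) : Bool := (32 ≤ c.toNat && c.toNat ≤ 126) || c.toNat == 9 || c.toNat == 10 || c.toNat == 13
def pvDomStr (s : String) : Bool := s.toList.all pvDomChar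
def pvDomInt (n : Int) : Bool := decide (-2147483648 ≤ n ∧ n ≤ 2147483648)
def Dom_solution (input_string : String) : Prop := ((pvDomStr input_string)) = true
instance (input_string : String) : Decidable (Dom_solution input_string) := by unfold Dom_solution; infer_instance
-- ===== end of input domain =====

-- B replaces A's two Counters (total counts plus counts of a consecutive-dedup string) by one pass
-- maintaining a letter -> run-count dict, dropping A's redundant total-count >= 2 filter; objective: simpler.

-- ===== PORT A =====
def solution (input_string : String) : String :=
  let cs := input_string.toList
  let cntDict := PySem.Dict.counter cs
  let result := cntDict.items.foldl (fun acc kv => if kv.2 ≥ 2 then acc ++ [kv.1] else acc) ([] : List Char)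
  let notRepeatString :=
    (cs.foldl (fun (st : List Char × Option Char) ele =>
        (if st.2 = none ∨ st.2 ≠ some ele then st.1 ++ [ele] else st.1, some ele))
      (([] : List Char), (none : Option Char))).1
  let notRepeat := PySem.Dict.counter notRepeatString
  -- Python's `not_repeat[t]` never raises here (t always occurs in not_repeat_string), so getD is exact
  let answer := result.foldl (fun acc t => if notRepeat.getD t 0 ≥ 2 then acc ++ [t] else acc) ([] : List Char)
  if answer.length > 0 then String.mk (PySem.List.sorted answer (fun c => c) false) else "N"

-- ===== PORT B =====
def solution_alt (input_string : String) : String :=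
  let st := input_string.toList.foldl
      (fun (st : PySem.Dict Char Int × Option Char) ch =>
        (if some ch ≠ st.2 then st.1.insert ch (st.1.getD ch 0 + 1) else st.1, some ch))
      ((PySem.Dict.empty : PySem.Dict Char Int), (none : Option Char))
  let loners := PySem.List.sorted ((st.1.items.filter (fun kv => kv.2 ≥ 2)).map (·.1)) (fun c => c) false
  if loners ≠ [] then String.mk loners else "N"

-- ===== PRECONDITION & SPEC =====
def Spec_solution (input_string : String) (out : String) : Prop := out = solution_alt input_string
instance (input_string : String) (out : String) : Decidable (Spec_solution input_string out) := by unfold Spec_solution; infer_instance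

-- ===== CLAIM (what is proved, stated in full; the proofs are below) =====
def Claim_equal_solution : Prop := ∀ (input_string : String), Dom_solution input_string → Spec_solution input_string (solution input_string)

-- ===== LEMMAS AND PROOFS =====

/-- The consecutive-dedup list both loops effectively traverse. -/
def keptRuns (prev : Option Char) : List Char → List Char
  | [] => []
  | c :: rest => if prev = none ∨ prev ≠ some c then c :: keptRuns (some c) rest else keptRuns (some c) rest

lemma keptRuns_sublist (prev : Option Char) (cs : List Char) : (keptRuns prev cs).Sublist cs := by
  induction cs generalizing prev with
  | nil => simp [keptRuns]
  | cons c rest ih =>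
    simp only [keptRuns]
    split
    · exact (ih (some c)).cons₂ c
    · exact (ih (some c)).cons c

lemma foldlA_eq_keptRuns (cs : List Char) (acc : List Char) (prev : Option Char) :
    (cs.foldl (fun (st : List Char × Option Char) ele =>
        (if st.2 = none ∨ st.2 ≠ some ele then st.1 ++ [ele] else st.1, some ele)) (acc, prev)).1
      = acc ++ keptRuns prev cs := by
  induction cs generalizing acc prev with
  | nil => simp [keptRuns]
  | cons c rest ih =>
    simp only [List.foldl_cons, keptRuns]
    split
    · rw [ih]; simp
    · rw [ih]

lemma foldlB_eq_keptRuns (cs : List Char) (d : PySem.Dict Char Int) (prev : Option Char) :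
    (cs.foldl (fun (st : PySem.Dict Char Int × Option Char) ch =>
        (if some ch ≠ st.2 then st.1.insert ch (st.1.getD ch 0 + 1) else st.1, some ch)) (d, prev)).1
      = (keptRuns prev cs).foldl (fun d x => d.insert x (d.getD x 0 + 1)) d := by
  induction cs generalizing d prev with
  | nil => simp [keptRuns]
  | cons c rest ih =>
    simp only [List.foldl_cons, keptRuns]
    by_cases h : prev = none ∨ prev ≠ some c
    · have h' : some c ≠ prev := by
        rcases h with h | h
        · simp [h]
        · exact fun e => h e.symm
      simp only [if_pos h, if_pos h', List.foldl_cons]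
      exact ih _ _
    · have h' : ¬ some c ≠ prev := by
        simp only [not_or, not_not] at h
        exact fun e => e h.2.symm
      simp only [if_neg h, if_neg h']
      exact ih _ _

/-- A's pre-sort answer list and B's pre-sort letter list are permutations. -/
lemma answer_perm (cs nrs : List Char) (h : keptRuns none cs = nrs) :
    (List.filter (fun x => decide (2 ≤ (List.count x nrs : Int)))
        (List.filter (fun x => decide (2 ≤ (List.count x cs : Int))) (PySem.Set.ofList cs))).Perm
      (List.filter (fun x => decide (2 ≤ (List.count x nrs : Int))) (PySem.Set.ofList nrs)) := by
  rw [List.perm_ext_iff_of_nodup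
    (((PySem.Set.nodup_ofList cs).filter _).filter _)
    ((PySem.Set.nodup_ofList nrs).filter _)]
  intro k
  have hsub : nrs.Sublist cs := h ▸ keptRuns_sublist none cs
  have hcount : nrs.count k ≤ cs.count k := hsub.count_le k
  simp only [List.mem_filter, PySem.Set.mem_ofList, decide_eq_true_eq]
  constructor
  · rintro ⟨⟨_, _⟩, hr⟩
    refine ⟨List.count_pos_iff.mp ?_, hr⟩
    omega
  · rintro ⟨hk, hr⟩
    exact ⟨⟨hsub.subset hk, by omega⟩, hr⟩

lemma solution_eq (input_string : String) : solution input_string = solution_alt input_string := by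
  unfold solution solution_alt
  dsimp only
  rw [foldlA_eq_keptRuns, foldlB_eq_keptRuns, PySem.Dict.foldl_insert_getD_add_one_eq_counter]
  simp only [List.nil_append]
  generalize input_string.toList = cs
  generalize hnrs : keptRuns none cs = nrs
  rw [PySem.List.foldl_append_ite (p := fun kv : Char × Int => kv.2 ≥ 2) (f := fun kv => kv.1)]
  simp only [List.nil_append]
  simp only [ge_iff_le]
  rw [PySem.List.foldl_append_ite_eq_filter (p := fun t => 2 ≤ (PySem.Dict.counter nrs).getD t 0)]
  simp only [List.nil_append, PySem.Dict.items_counter, List.filter_map, List.map_map,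
    Function.comp_def, List.map_id', PySem.Dict.getD_counter]
  have hperm := answer_perm cs nrs hnrs
  have hsorted := (PySem.List.sorted_id_eq_sorted_id_iff_perm _ _).mpr hperm
  have hlen := hperm.length_eq
  by_cases hnil : (List.filter (fun x => decide (2 ≤ (List.count x nrs : Int))) (PySem.Set.ofList nrs)) = []
  · have h0 : (List.filter (fun x => decide (2 ≤ (List.count x nrs : Int)))
        (List.filter (fun x => decide (2 ≤ (List.count x cs : Int))) (PySem.Set.ofList cs))) = [] := by
      rw [← List.length_eq_zero_iff, hlen, hnil]; rfl
    rw [h0, hnil]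
    simp [PySem.List.sorted_eq_nil_iff]
  · have hpos : 0 < (List.filter (fun x => decide (2 ≤ (List.count x nrs : Int)))
        (List.filter (fun x => decide (2 ≤ (List.count x cs : Int))) (PySem.Set.ofList cs))).length := by
      rw [hlen]; exact List.length_pos_iff.mpr hnil
    have hsnil : (PySem.List.sorted (List.filter (fun x => decide (2 ≤ (List.count x nrs : Int)))
        (PySem.Set.ofList nrs)) (fun x => x) false) ≠ [] := by
      rw [Ne, PySem.List.sorted_eq_nil_iff]; exact hnil
    rw [if_pos hpos, if_pos hsnil, hsorted]

-- ===== VERDICT (by name: the statement is the Claim_ definition above) =====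
theorem solution_spec : Claim_equal_solution := by
  intro s _
  unfold Spec_solution
  exact solution_eq s
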